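-- pv_equiv track=rewrite | github.com/Albertree/SOAR-ARC-test | procedural_memory/base_rules/connect/connect_diamonds.py | _draw_connections
-- ===== SOURCE A (Python) =====
-- def _get_consecutive_pairs(diamonds):
--     """Get pairs of consecutive diamonds along same row or column."""
--     pairs = []
--     # Group by row
--     by_row = {}
--     for r, c in diamonds:
--         by_row.setdefault(r, []).append(c)
--     for row, cols in by_row.items():
--         cols.sort()
--         for i in range(len(cols) - 1):
--             pairs.append(((row, cols[i]), (row, cols[i + 1])))
--     # Group by column
--     by_col = {}
--     for r, c in diamonds:
--         by_col.setdefault(c, []).append(r)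
--     for col, rows in by_col.items():
--         rows.sort()
--         for i in range(len(rows) - 1):
--             pairs.append(((rows[i], col), (rows[i + 1], col)))
--     return pairs
--
-- def _draw_connections(grid, diamonds, cc):
--     """Draw connector lines between consecutive aligned diamonds."""
--     result = [row[:] for row in grid]
--     for (r1, c1), (r2, c2) in _get_consecutive_pairs(diamonds):
--         if r1 == r2:
--             for c in range(c1 + 2, c2 - 1):
--                 result[r1][c] = cc
--         elif c1 == c2:
--             for r in range(r1 + 2, r2 - 1):
--                 result[r][c1] = cc
--     return result
-- ===== SOURCE B (Python) =====
-- def _draw_connections(grid, diamonds, cc):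
--     """Draw connector lines between consecutive aligned diamonds.
--
--     Same return value as the original; instead of grouping into dict buckets and
--     materialising a pair list, sort the diamonds once per axis and scan adjacent
--     neighbours, filling directly.
--     """
--     result = [row[:] for row in grid]
--     s = sorted(diamonds)
--     for (r1, c1), (r2, c2) in zip(s, s[1:]):
--         if r1 == r2:
--             for c in range(c1 + 2, c2 - 1):
--                 result[r1][c] = cc
--     t = sorted(diamonds, key=lambda d: (d[1], d[0]))
--     for (r1, c1), (r2, c2) in zip(t, t[1:]):
--         if c1 == c2:
--             for r in range(r1 + 2, r2 - 1):
--                 result[r][c1] = cc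
--     return result
-- ===== Notes on version B (the rewrite author's own statement) =====
-- stated objective: simpler
-- what changed: B drops the _get_consecutive_pairs helper, the two dict buckets and the materialised pair list: it sorts the diamond list once per axis and fills while scanning adjacent neighbours that share a row (then a column) directly.
import Mathlib
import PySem

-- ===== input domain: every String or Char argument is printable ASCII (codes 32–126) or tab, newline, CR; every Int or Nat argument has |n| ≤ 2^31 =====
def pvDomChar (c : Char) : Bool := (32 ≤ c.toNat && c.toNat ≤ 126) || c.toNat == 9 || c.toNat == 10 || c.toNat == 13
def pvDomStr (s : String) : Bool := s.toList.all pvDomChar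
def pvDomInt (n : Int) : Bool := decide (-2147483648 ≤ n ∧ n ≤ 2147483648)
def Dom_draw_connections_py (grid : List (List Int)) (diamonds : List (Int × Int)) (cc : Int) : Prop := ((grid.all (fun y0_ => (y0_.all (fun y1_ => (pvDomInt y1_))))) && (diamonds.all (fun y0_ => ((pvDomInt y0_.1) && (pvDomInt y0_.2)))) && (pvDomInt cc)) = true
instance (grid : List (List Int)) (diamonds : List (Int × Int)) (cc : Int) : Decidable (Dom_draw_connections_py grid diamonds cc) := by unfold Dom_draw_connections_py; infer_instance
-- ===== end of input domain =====

-- B replaces A's dict-bucket grouping plus materialised consecutive-pair list by two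
-- sorted scans of adjacent diamonds that fill directly (objective: simpler).
-- A mutates no argument (it copies the grid); equivalence is about the return value.

-- ===== PORT A =====

-- `result[r][c] = cc` of either Python: exact (incl. negative-index wraparound) whenever
-- Python does not raise IndexError; Pre_ excludes out-of-range writes.
def pvSetCell (g : List (List Int)) (r c v : Int) : List (List Int) :=
  PySem.List.pySetD g r (PySem.List.pySetD (PySem.List.pyGetD g r []) c v)

def pvGetConsecutivePairs (diamonds : List (Int × Int)) : List ((Int × Int) × (Int × Int)) :=
  -- by_row grouping: d.setdefault(r, []).append(c)
  let by_row : PySem.Dict Int (List Int) :=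
    diamonds.foldl (fun d p => d.modify p.1 [] (fun l => l ++ [p.2])) PySem.Dict.empty
  let pairs : List ((Int × Int) × (Int × Int)) :=
    by_row.items.foldl (fun pairs rc =>
      let cols := PySem.List.sorted rc.2 (fun x => x)
      (PySem.List.pyRange 0 ((cols.length : Int) - 1)).foldl
        (fun pairs i => pairs ++ [((rc.1, PySem.List.pyGetD cols i 0), (rc.1, PySem.List.pyGetD cols (i + 1) 0))]) pairs) []
  -- by_col grouping
  let by_col : PySem.Dict Int (List Int) :=
    diamonds.foldl (fun d p => d.modify p.2 [] (fun l => l ++ [p.1])) PySem.Dict.empty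
  by_col.items.foldl (fun pairs cr =>
    let rows := PySem.List.sorted cr.2 (fun x => x)
    (PySem.List.pyRange 0 ((rows.length : Int) - 1)).foldl
      (fun pairs i => pairs ++ [((PySem.List.pyGetD rows i 0, cr.1), (PySem.List.pyGetD rows (i + 1) 0, cr.1))]) pairs) pairs

def draw_connections_py (grid : List (List Int)) (diamonds : List (Int × Int)) (cc : Int) : List (List Int) :=
  -- result = [row[:] for row in grid] is the identity on immutable lists
  (pvGetConsecutivePairs diamonds).foldl (fun result pr =>
    if pr.1.1 = pr.2.1 then
      (PySem.List.pyRange (pr.1.2 + 2) (pr.2.2 - 1)).foldl (fun result c => pvSetCell result pr.1.1 c cc) result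
    else if pr.1.2 = pr.2.2 then
      (PySem.List.pyRange (pr.1.1 + 2) (pr.2.1 - 1)).foldl (fun result r => pvSetCell result r pr.1.2 cc) result
    else result) grid

-- ===== PORT B =====

def draw_connections_py_alt (grid : List (List Int)) (diamonds : List (Int × Int)) (cc : Int) : List (List Int) :=
  -- s = sorted(diamonds); zip(s, s[1:]) scan, filling between same-row neighbours
  let s := PySem.List.sorted2 diamonds (fun p => p.1) (fun p => p.2)
  let result :=
    (s.zip (PySem.List.slice s (some 1) none)).foldl (fun result pq =>
      if pq.1.1 = pq.2.1 then
        (PySem.List.pyRange (pq.1.2 + 2) (pq.2.2 - 1)).foldl (fun result c => pvSetCell result pq.1.1 c cc) result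
      else result) grid
  -- t = sorted(diamonds, key=lambda d: (d[1], d[0])); same scan for columns
  let t := PySem.List.sorted2 diamonds (fun p => p.2) (fun p => p.1)
  (t.zip (PySem.List.slice t (some 1) none)).foldl (fun result pq =>
    if pq.1.2 = pq.2.2 then
      (PySem.List.pyRange (pq.1.1 + 2) (pq.2.1 - 1)).foldl (fun result r => pvSetCell result r pq.1.2 cc) result
    else result) result

-- ===== PRECONDITION & SPEC =====

-- Pre_ excludes the inputs on which A raises IndexError while drawing a connector
-- (negative in-range indices wrap in Python and are admitted; the ports are exact there).
-- For every pair of consecutive aligned diamonds with a non-empty fill range, every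
-- index the fill touches must be in Python range.  On ragged grids Pre_ is slightly
-- narrower than the exact no-raise condition: it asks the fill columns to fit EVERY
-- row of the grid, not only the row actually written — there A and B return the same
-- value (see cites).
def Pre_draw_connections_py (grid : List (List Int)) (diamonds : List (Int × Int)) (cc : Int) : Prop :=
  ∀ d1 ∈ diamonds, ∀ d2 ∈ diamonds,
    ((d1.1 = d2.1 ∧ d1.2 + 4 ≤ d2.2 ∧ (∀ d3 ∈ diamonds, d3.1 = d1.1 → (d3.2 ≤ d1.2 ∨ d2.2 ≤ d3.2)) →
        PySem.Raise.InRange grid.length d1.1 ∧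
        ∀ row ∈ grid, PySem.Raise.InRange row.length (d1.2 + 2) ∧ PySem.Raise.InRange row.length (d2.2 - 2)) ∧
     (d1.2 = d2.2 ∧ d1.1 + 4 ≤ d2.1 ∧ (∀ d3 ∈ diamonds, d3.2 = d1.2 → (d3.1 ≤ d1.1 ∨ d2.1 ≤ d3.1)) →
        PySem.Raise.InRange grid.length (d1.1 + 2) ∧ PySem.Raise.InRange grid.length (d2.1 - 2) ∧
        ∀ row ∈ grid, PySem.Raise.InRange row.length d1.2))
instance (grid : List (List Int)) (diamonds : List (Int × Int)) (cc : Int) : Decidable (Pre_draw_connections_py grid diamonds cc) := by unfold Pre_draw_connections_py; infer_instance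

def pvWitness_draw_connections_py : List (List Int) × (List (Int × Int)) × Int :=
  ([[0, 0, 0, 0, 0, 0], [0, 0, 0, 0, 0, 0]], [(0, 0), (0, 5), (1, 0), (1, 5)], 3)

def Spec_draw_connections_py (grid : List (List Int)) (diamonds : List (Int × Int)) (cc : Int) (out : List (List Int)) : Prop := out = draw_connections_py_alt grid diamonds cc
instance (grid : List (List Int)) (diamonds : List (Int × Int)) (cc : Int) (out : List (List Int)) : Decidable (Spec_draw_connections_py grid diamonds cc out) := by unfold Spec_draw_connections_py; infer_instance

-- ===== CLAIM (what is proved, stated in full; the proofs are below) =====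
def Claim_equal_draw_connections_py : Prop := ∀ (grid : List (List Int)) (diamonds : List (Int × Int)) (cc : Int), Dom_draw_connections_py grid diamonds cc → Pre_draw_connections_py grid diamonds cc → Spec_draw_connections_py grid diamonds cc (draw_connections_py grid diamonds cc)

-- ===== LEMMAS AND PROOFS =====

-- Proof-side vocabulary ------------------------------------------------------

/-- Lexicographic `≤` on coordinate pairs. -/
def pvLexLe (u v : Int × Int) : Prop := u.1 < v.1 ∨ (u.1 = v.1 ∧ u.2 ≤ v.2)

/-- Apply a list of writes, each setting one cell to `v`. -/
def pvFill (g : List (List Int)) (ws : List (Int × Int)) (v : Int) : List (List Int) :=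
  ws.foldl (fun g p => pvSetCell g p.1 p.2 v) g

/-- A write is inside Python index range for grid `g` (wraparound admitted). -/
def pvOkW (g : List (List Int)) (p : Int × Int) : Prop :=
  PySem.Raise.InRange g.length p.1 ∧ ∀ row ∈ g, PySem.Raise.InRange row.length p.2

/-- Python's resolution of a (possibly negative) in-range index. -/
def pvIdx (n : Nat) (i : Int) : Nat := if 0 ≤ i then i.toNat else n - (-i).toNat

/-- Adjacent pairs of a list. -/
def pvAdj {α : Type} (xs : List α) : List (α × α) := xs.zip xs.tail

/-- The row-bucket dict A builds. -/
def pvGroup (ds : List (Int × Int)) : PySem.Dict Int (List Int) :=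
  ds.foldl (fun d p => d.modify p.1 [] (fun l => l ++ [p.2])) PySem.Dict.empty

/-- Normal form of A's horizontal writes. -/
def pvAH (ds : List (Int × Int)) : List (Int × Int) :=
  (pvGroup ds).items.flatMap (fun rc =>
    (pvAdj (PySem.List.sorted rc.2 (fun x => x))).flatMap (fun ab =>
      (PySem.List.pyRange (ab.1 + 2) (ab.2 - 1)).map (fun c => (rc.1, c))))

/-- Normal form of B's horizontal writes. -/
def pvBH (ds : List (Int × Int)) : List (Int × Int) :=
  (pvAdj (PySem.List.sorted2 ds (fun p => p.1) (fun p => p.2))).flatMap (fun pq =>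
    if pq.1.1 = pq.2.1 then (PySem.List.pyRange (pq.1.2 + 2) (pq.2.2 - 1)).map (fun c => (pq.1.1, c)) else [])

/-- Cell (r, c) lies strictly between two horizontally consecutive diamonds of `ds`. -/
def pvGap (ds : List (Int × Int)) (r c : Int) : Prop :=
  ∃ a b : Int, (r, a) ∈ ds ∧ (r, b) ∈ ds ∧ (∀ x : Int, (r, x) ∈ ds → x ≤ a ∨ b ≤ x) ∧ a + 2 ≤ c ∧ c < b - 1

-- Generic machinery ----------------------------------------------------------

theorem pv_foldl_fill {α : Type} (v : Int) (W : α → List (Int × Int))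
    (body : List (List Int) → α → List (List Int))
    (h : ∀ g a, body g a = pvFill g (W a) v) :
    ∀ (L : List α) (g : List (List Int)), L.foldl body g = pvFill g (L.flatMap W) v := by
  intro L
  induction L with
  | nil => intro g; simp [pvFill]
  | cons a L ih =>
    intro g
    simp only [List.foldl_cons, List.flatMap_cons, h]
    rw [ih, pvFill, pvFill, pvFill, List.foldl_append]

theorem pv_mem_adj {α : Type} (xs : List α) (ab : α × α) :
    ab ∈ pvAdj xs ↔ ∃ i : Nat, ∃ h : i + 1 < xs.length, xs[i] = ab.1 ∧ xs[i + 1] = ab.2 := by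
  unfold pvAdj
  rw [List.mem_iff_getElem]
  constructor
  · rintro ⟨i, hi, hab⟩
    have hlen : i + 1 < xs.length := by
      simp [List.length_zip, List.length_tail] at hi; omega
    refine ⟨i, hlen, ?_, ?_⟩
    · have := congrArg Prod.fst hab
      simpa [List.getElem_zip] using this
    · have := congrArg Prod.snd hab
      simpa [List.getElem_zip, List.getElem_tail] using this
  · rintro ⟨i, hlen, h1, h2⟩
    have hi : i < (xs.zip xs.tail).length := by
      simp [List.length_zip, List.length_tail]; omega
    refine ⟨i, hi, ?_⟩
    apply Prod.ext <;> simp [List.getElem_zip, List.getElem_tail, h1, h2]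

theorem pv_pairwise_insertBy {α : Type} (R : α → α → Prop) (before : α → α → Bool)
    (htrans : ∀ a b c, R a b → R b c → R a c)
    (h1 : ∀ a b, before a b = true → R a b) (h2 : ∀ a b, before a b = false → R b a)
    (x : α) (ys : List α) (hys : ys.Pairwise R) :
    (PySem.List.insertBy before x ys).Pairwise R := by
  induction ys with
  | nil => simp [PySem.List.insertBy.eq_1]
  | cons y ys ih =>
    rw [PySem.List.insertBy.eq_2]
    rcases List.pairwise_cons.mp hys with ⟨hy, hys'⟩
    by_cases hb : before x y = true
    · simp only [hb, if_true]
      refine List.pairwise_cons.mpr ⟨?_, hys⟩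
      intro z hz
      rcases List.mem_cons.mp hz with rfl | hz'
      · exact h1 _ _ hb
      · exact htrans _ _ _ (h1 _ _ hb) (hy _ hz')
    · simp only [hb]
      refine List.pairwise_cons.mpr ⟨?_, ih hys'⟩
      intro z hz
      rcases (PySem.List.mem_insertBy _ _ _ _).mp hz with rfl | hz'
      · exact h2 _ _ (by simpa using hb)
      · exact hy _ hz'

theorem pv_sorted2_pairwise (ds : List (Int × Int)) :
    (PySem.List.sorted2 ds (fun p => p.1) (fun p => p.2)).Pairwise pvLexLe := by
  have htrans : ∀ a b c : Int × Int, pvLexLe a b → pvLexLe b c → pvLexLe a c := by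
    intro a b c h1 h2
    unfold pvLexLe at *
    rcases h1 with h1 | ⟨h1, h1'⟩ <;> rcases h2 with h2 | ⟨h2, h2'⟩ <;> [left; left; left; right] <;> omega
  unfold PySem.List.sorted2
  simp only [if_neg (by decide : ¬ (false = true))]
  suffices hgen : ∀ (l : List (Int × Int)) (acc : List (Int × Int)), acc.Pairwise pvLexLe →
      (l.foldl (fun acc x => PySem.List.insertBy
        (fun a b => decide (a.1 < b.1) || (!decide (b.1 < a.1) && decide (a.2 < b.2))) x acc) acc).Pairwise pvLexLe by
    exact hgen ds [] (by simp)
  intro l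
  induction l with
  | nil => intro acc hacc; exact hacc
  | cons x l ih =>
    intro acc hacc
    refine ih _ (pv_pairwise_insertBy pvLexLe _ htrans ?_ ?_ x acc hacc)
    · intro a b hab
      simp only [Bool.or_eq_true, Bool.and_eq_true, Bool.not_eq_true', decide_eq_true_eq,
        decide_eq_false_iff_not] at hab
      unfold pvLexLe
      rcases hab with h | ⟨h, h'⟩
      · left; exact h
      · by_cases hlt : a.1 < b.1
        · left; exact hlt
        · right; constructor <;> omega
    · intro a b hab
      simp only [Bool.or_eq_false_iff, Bool.and_eq_false_iff, Bool.not_eq_false',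
        decide_eq_true_eq, decide_eq_false_iff_not] at hab
      unfold pvLexLe
      rcases hab with ⟨h1, h2 | h2⟩
      · left; exact h2
      · by_cases hlt : b.1 < a.1
        · left; exact hlt
        · right; constructor <;> omega

theorem pv_insertBy_map_swap (bs bt : (Int × Int) → (Int × Int) → Bool)
    (hb : ∀ a b, bt a b = bs a.swap b.swap) (x : Int × Int) :
    ∀ ys : List (Int × Int),
      (PySem.List.insertBy bt x ys).map Prod.swap
        = PySem.List.insertBy bs x.swap (ys.map Prod.swap) := by
  intro ys
  induction ys with
  | nil => simp [PySem.List.insertBy.eq_1]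
  | cons y ys ih =>
    rw [PySem.List.insertBy.eq_2, List.map_cons, PySem.List.insertBy.eq_2, ← hb]
    by_cases hc : bt x y = true
    · rw [if_pos hc, if_pos hc]; simp
    · rw [if_neg hc, if_neg hc, List.map_cons, ih]

theorem pv_foldl_insertBy_swap (bs bt : (Int × Int) → (Int × Int) → Bool)
    (hb : ∀ a b, bt a b = bs a.swap b.swap) (ds : List (Int × Int)) :
    ds.foldl (fun acc x => PySem.List.insertBy bt x acc) []
      = ((ds.map Prod.swap).foldl (fun acc x => PySem.List.insertBy bs x acc) []).map Prod.swap := by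
  rw [List.foldl_map]
  suffices hgen : ∀ acc : List (Int × Int),
      ds.foldl (fun acc x => PySem.List.insertBy bt x acc) acc
        = (ds.foldl (fun acc x => PySem.List.insertBy bs x.swap acc) (acc.map Prod.swap)).map Prod.swap by
    simpa using hgen []
  induction ds with
  | nil => intro acc; simp
  | cons d ds ih =>
    intro acc
    simp only [List.foldl_cons]
    rw [ih (PySem.List.insertBy bt d acc), pv_insertBy_map_swap bs bt hb]

theorem pv_sorted2_snd_fst (ds : List (Int × Int)) :
    PySem.List.sorted2 ds (fun p => p.2) (fun p => p.1)
      = (PySem.List.sorted2 (ds.map Prod.swap) (fun p => p.1) (fun p => p.2)).map Prod.swap := by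
  exact pv_foldl_insertBy_swap
    (fun a b => decide (a.1 < b.1) || (!decide (b.1 < a.1) && decide (a.2 < b.2)))
    (fun a b => decide (a.2 < b.2) || (!decide (b.2 < a.2) && decide (a.1 < b.1)))
    (fun a b => rfl) ds

-- The heart: on a lex-sorted list, cells covered between some adjacent same-row pair
-- are exactly the cells between two consecutive diamonds of a row.
theorem pv_core (s : List (Int × Int)) (hs : s.Pairwise pvLexLe) (r c : Int) :
    (∃ i : Nat, ∃ h : i + 1 < s.length,
        s[i].1 = r ∧ s[i + 1].1 = r ∧ s[i].2 + 2 ≤ c ∧ c < s[i + 1].2 - 1)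
      ↔ (∃ a b : Int, (r, a) ∈ s ∧ (r, b) ∈ s ∧
          (∀ x : Int, (r, x) ∈ s → x ≤ a ∨ b ≤ x) ∧ a + 2 ≤ c ∧ c < b - 1) := by
  have hpg := List.pairwise_iff_getElem.mp hs
  constructor
  · rintro ⟨i, h, hi1, hi2, hc1, hc2⟩
    refine ⟨s[i].2, s[i + 1].2, ?_, ?_, ?_, hc1, hc2⟩
    · rw [show (r, s[i].2) = s[i] by rw [← hi1]]
      exact List.getElem_mem _
    · rw [show (r, s[i + 1].2) = s[i + 1] by rw [← hi2]]
      exact List.getElem_mem _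
    · intro x hx
      obtain ⟨k, hk, hke⟩ := List.mem_iff_getElem.mp hx
      rcases Nat.lt_or_ge k (i + 1) with hk1 | hk1
      · left
        rcases Nat.lt_or_ge k i with hk2 | hk2
        · have hlex := hpg k i hk (by omega) hk2
          rw [hke] at hlex
          unfold pvLexLe at hlex
          dsimp only at hlex
          rcases hlex with h' | ⟨h', h''⟩ <;> omega
        · have hki : k = i := by omega
          subst hki
          simp [hke]
      · right
        rcases Nat.eq_or_lt_of_le hk1 with heq | hlt
        · subst heq
          simp [hke]
        · have hlex := hpg (i + 1) k h hk hlt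
          rw [hke] at hlex
          unfold pvLexLe at hlex
          dsimp only at hlex
          rcases hlex with h' | ⟨h', h''⟩ <;> omega
  · rintro ⟨a, b, ha, hb, hbetween, hc1, hc2⟩
    obtain ⟨i1, hi1len, hi1⟩ := List.mem_iff_getElem.mp ha
    obtain ⟨i2, hi2len, hi2⟩ := List.mem_iff_getElem.mp hb
    have hex : ∃ n : Nat, n < s.length ∧
        ¬ ((s.getD n (0, 0)).1 < r ∨ ((s.getD n (0, 0)).1 = r ∧ (s.getD n (0, 0)).2 < b)) := by
      refine ⟨i2, hi2len, ?_⟩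
      rw [List.getD_eq_getElem _ _ hi2len, hi2]
      simp
    have hspec := Nat.find_spec hex
    have hji2' : Nat.find hex ≤ i2 := by
      apply Nat.find_min' hex
      refine ⟨hi2len, ?_⟩
      rw [List.getD_eq_getElem _ _ hi2len, hi2]
      simp
    set j := Nat.find hex with hjdef
    obtain ⟨hjlen, hjnot⟩ := hspec
    rw [List.getD_eq_getElem _ _ hjlen] at hjnot
    push Not at hjnot
    have hji2 : j ≤ i2 := hji2'
    have hi1j : i1 < j := by
      by_contra hge
      push Not at hge
      rcases Nat.eq_or_lt_of_le hge with heq | hlt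
      · subst heq
        rw [hi1] at hjnot
        simp at hjnot
        omega
      · have hlex := hpg j i1 hjlen hi1len hlt
        rw [hi1] at hlex
        unfold pvLexLe at hlex
        dsimp only at hlex
        obtain ⟨hj1, hj2⟩ := hjnot
        rcases hlex with h' | ⟨h', h''⟩
        · omega
        · have := hj2 h'
          omega
    have hsj : s[j] = (r, b) := by
      rcases Nat.eq_or_lt_of_le hji2 with heq | hlt
      · subst heq
        exact hi2
      · have hlex := hpg j i2 hjlen hi2len hlt
        rw [hi2] at hlex
        unfold pvLexLe at hlex
        dsimp only at hlex
        obtain ⟨hj1, hj2⟩ := hjnot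
        have h1 : s[j].1 = r := by rcases hlex with h' | ⟨h', h''⟩ <;> omega
        have h2 : s[j].2 = b := by
          have := hj2 h1
          rcases hlex with h' | ⟨h', h''⟩ <;> omega
        calc s[j] = (s[j].1, s[j].2) := by simp
          _ = (r, b) := by rw [h1, h2]
    have hj1len : j - 1 < s.length := by omega
    have hlt1 : s[j - 1].1 < r ∨ (s[j - 1].1 = r ∧ s[j - 1].2 < b) := by
      have hQj1 := Nat.find_min hex (show j - 1 < Nat.find hex by rw [← hjdef]; omega)
      push Not at hQj1
      have := hQj1 hj1len
      rw [List.getD_eq_getElem _ _ hj1len] at this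
      tauto
    have hge1 : pvLexLe (r, a) s[j - 1] := by
      rcases Nat.eq_or_lt_of_le (show i1 ≤ j - 1 by omega) with heq | hlt
      · have hj1i : j - 1 = i1 := heq.symm
        subst hj1i
        rw [hi1]
        unfold pvLexLe
        right
        exact ⟨rfl, le_refl _⟩
      · have hlex := hpg i1 (j - 1) hi1len hj1len hlt
        rwa [hi1] at hlex
    unfold pvLexLe at hge1
    dsimp only at hge1
    have hfst : s[j - 1].1 = r ∧ a ≤ s[j - 1].2 := by
      rcases hge1 with h' | ⟨h', h''⟩ <;> rcases hlt1 with h2 | ⟨h2, h2'⟩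
      · omega
      · omega
      · omega
      · exact ⟨h'.symm, h''⟩
    have hmem1 : (r, s[j - 1].2) ∈ s := by
      rw [show (r, s[j - 1].2) = s[j - 1] by rw [← hfst.1]]
      exact List.getElem_mem _
    have hsndb : s[j - 1].2 < b := by
      rcases hlt1 with h2 | ⟨h2, h2'⟩ <;> omega
    have hle_a : s[j - 1].2 ≤ a := by
      rcases hbetween _ hmem1 with h' | h' <;> omega
    have hidx : j - 1 + 1 = j := by omega
    refine ⟨j - 1, by omega, hfst.1, ?_, by omega, ?_⟩
    · simp only [hidx]
      rw [hsj]
    · simp only [hidx]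
      rw [hsj]
      omega

-- Write-set characterisations -----------------------------------------------

theorem pv_group_nodup (ds : List (Int × Int)) : (pvGroup ds).keys.Nodup :=
  PySem.Dict.nodup_keys_foldl_modify_key ds Prod.fst [] (fun _ x v => v ++ [x.2])
    PySem.Dict.empty (by simp [PySem.Dict.keys_empty])

theorem pv_group_keys (ds : List (Int × Int)) (r : Int) :
    r ∈ (pvGroup ds).keys ↔ r ∈ ds.map Prod.fst := by
  unfold pvGroup
  rw [PySem.Dict.keys_foldl_modify_key ds Prod.fst [] (fun _ x v => v ++ [x.2]) PySem.Dict.empty]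
  rw [PySem.Set.mem_update]
  simp [PySem.Dict.keys_empty]

theorem pv_group_getD (ds : List (Int × Int)) (r : Int) :
    (pvGroup ds).getD r [] = (ds.filter (fun q => q.1 == r)).map (fun q => q.2) := by
  unfold pvGroup
  rw [PySem.Dict.getD_foldl_modify_append ds PySem.Dict.empty r]
  simp

theorem pv_mem_items (ds : List (Int × Int)) (rc : Int × List Int) :
    rc ∈ (pvGroup ds).items
      ↔ rc.1 ∈ ds.map Prod.fst ∧ rc.2 = (ds.filter (fun q => q.1 == rc.1)).map (fun q => q.2) := by
  rw [PySem.Dict.items_eq_map_keys (pvGroup ds) (pv_group_nodup ds) []]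
  rw [List.mem_map]
  constructor
  · rintro ⟨k, hk, rfl⟩
    exact ⟨(pv_group_keys ds k).mp hk, (pv_group_getD ds k)⟩
  · rintro ⟨h1, h2⟩
    refine ⟨rc.1, (pv_group_keys ds rc.1).mpr h1, ?_⟩
    rw [pv_group_getD ds rc.1, ← h2]

theorem pv_mem_colsOf (ds : List (Int × Int)) (r x : Int) :
    x ∈ (ds.filter (fun q => q.1 == r)).map (fun q => q.2) ↔ (r, x) ∈ ds := by
  rw [List.mem_map]
  constructor
  · rintro ⟨q, hq, rfl⟩
    rw [List.mem_filter] at hq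
    obtain ⟨hq1, hq2⟩ := hq
    have : q.1 = r := by simpa using hq2
    rwa [show (r, q.2) = q by rw [← this]]
  · intro h
    exact ⟨(r, x), List.mem_filter.mpr ⟨h, by simp⟩, rfl⟩

theorem pv_row_char (ds : List (Int × Int)) (r c : Int) :
    (∃ ab ∈ pvAdj (PySem.List.sorted ((ds.filter (fun q => q.1 == r)).map (fun q => q.2)) (fun x => x)),
        ab.1 + 2 ≤ c ∧ c < ab.2 - 1)
      ↔ pvGap ds r c := by
  set cols := (ds.filter (fun q => q.1 == r)).map (fun q => q.2) with hcols
  set sr := PySem.List.sorted cols (fun x => x) with hsr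
  set t := sr.map (fun x => (r, x)) with ht
  have htlen : t.length = sr.length := by simp [ht]
  have htpw : t.Pairwise pvLexLe := by
    apply List.Pairwise.map
    · intro a b hab
      unfold pvLexLe
      right
      exact ⟨rfl, hab⟩
    · exact PySem.List.sorted_pairwise cols (fun x => x)
  have htmem : ∀ x : Int, (r, x) ∈ t ↔ (r, x) ∈ ds := by
    intro x
    rw [ht, List.mem_map]
    constructor
    · rintro ⟨y, hy, hxy⟩
      have : y = x := by
        have := congrArg Prod.snd hxy
        simpa using this
      subst this
      rw [hsr, (PySem.List.sorted_perm cols (fun x => x) false).mem_iff] at hy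
      exact (pv_mem_colsOf ds r y).mp hy
    · intro hx
      refine ⟨x, ?_, rfl⟩
      rw [hsr, (PySem.List.sorted_perm cols (fun x => x) false).mem_iff]
      exact (pv_mem_colsOf ds r x).mpr hx
  have hcore := pv_core t htpw r c
  constructor
  · rintro ⟨ab, hab, hb1, hb2⟩
    obtain ⟨i, hi, h1, h2⟩ := (pv_mem_adj sr ab).mp hab
    have hgw := hcore.mp ⟨i, by omega, by simp [ht], by simp [ht], by
        simp only [ht, List.getElem_map]
        rw [h1, h2]
        exact ⟨hb1, hb2⟩⟩
    obtain ⟨a, b, ha, hb, hbet, hg1, hg2⟩ := hgw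
    exact ⟨a, b, (htmem a).mp ha, (htmem b).mp hb,
      fun x hx => hbet x ((htmem x).mpr hx), hg1, hg2⟩
  · rintro ⟨a, b, ha, hb, hbet, hg1, hg2⟩
    have haw := hcore.mpr ⟨a, b, (htmem a).mpr ha, (htmem b).mpr hb,
      fun x hx => hbet x ((htmem x).mp hx), hg1, hg2⟩
    obtain ⟨i, hi, h1, h2, h3, h4⟩ := haw
    have hi' : i + 1 < sr.length := by omega
    refine ⟨(sr[i], sr[i + 1]), (pv_mem_adj sr _).mpr ⟨i, hi', rfl, rfl⟩, ?_, ?_⟩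
    · have : t[i].2 = sr[i] := by simp [ht]
      omega
    · have : t[i + 1].2 = sr[i + 1] := by simp [ht]
      omega

theorem pv_mem_AH (ds : List (Int × Int)) (p : Int × Int) :
    p ∈ pvAH ds ↔ pvGap ds p.1 p.2 := by
  unfold pvAH
  rw [List.mem_flatMap]
  constructor
  · rintro ⟨rc, hrc, hp⟩
    rw [List.mem_flatMap] at hp
    obtain ⟨ab, hab, hpm⟩ := hp
    obtain ⟨c, hc, hcp⟩ := List.mem_map.mp hpm
    rw [PySem.List.mem_pyRange_one] at hc
    obtain ⟨hk, hcols⟩ := (pv_mem_items ds rc).mp hrc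
    have hp1 : p.1 = rc.1 := by rw [← hcp]
    have hp2 : p.2 = c := by rw [← hcp]
    rw [hp1]
    apply (pv_row_char ds rc.1 p.2).mp
    refine ⟨ab, ?_, by omega, by omega⟩
    rwa [hcols] at hab
  · intro hgap
    have hrow : p.1 ∈ ds.map Prod.fst := by
      obtain ⟨a, _, ha, _⟩ := hgap
      exact List.mem_map.mpr ⟨(p.1, a), ha, rfl⟩
    obtain ⟨ab, hab, hb1, hb2⟩ := (pv_row_char ds p.1 p.2).mpr hgap
    refine ⟨(p.1, (ds.filter (fun q => q.1 == p.1)).map (fun q => q.2)),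
      (pv_mem_items ds _).mpr ⟨hrow, rfl⟩, ?_⟩
    rw [List.mem_flatMap]
    refine ⟨ab, hab, ?_⟩
    apply List.mem_map.mpr
    refine ⟨p.2, PySem.List.mem_pyRange_one.mpr ⟨hb1, hb2⟩, ?_⟩
    simp

theorem pv_mem_BH (ds : List (Int × Int)) (p : Int × Int) :
    p ∈ pvBH ds ↔ pvGap ds p.1 p.2 := by
  unfold pvBH
  set s := PySem.List.sorted2 ds (fun q => q.1) (fun q => q.2) with hs
  have hmem : ∀ x : Int × Int, x ∈ s ↔ x ∈ ds := fun x =>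
    (PySem.List.sorted2_perm ds (fun q => q.1) (fun q => q.2) false).mem_iff
  have hcore := pv_core s (pv_sorted2_pairwise ds) p.1 p.2
  rw [List.mem_flatMap]
  constructor
  · rintro ⟨pq, hpq, hp⟩
    by_cases h : pq.1.1 = pq.2.1
    · rw [if_pos h] at hp
      obtain ⟨c, hc, hcp⟩ := List.mem_map.mp hp
      rw [PySem.List.mem_pyRange_one] at hc
      obtain ⟨i, hi, h1, h2⟩ := (pv_mem_adj s pq).mp hpq
      have hp1 : p.1 = pq.1.1 := by rw [← hcp]
      have hp2 : p.2 = c := by rw [← hcp]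
      have hgw := hcore.mp ⟨i, hi, by rw [h1, ← hp1], by rw [h2, ← h, ← hp1], by
        rw [h1]; omega, by rw [h2]; omega⟩
      obtain ⟨a, b, ha, hb, hbet, hg1, hg2⟩ := hgw
      exact ⟨a, b, (hmem _).mp ha, (hmem _).mp hb, fun x hx => hbet x ((hmem _).mpr hx), hg1, hg2⟩
    · rw [if_neg h] at hp
      simp at hp
  · intro hgap
    obtain ⟨a, b, ha, hb, hbet, hg1, hg2⟩ := hgap
    have haw := hcore.mpr ⟨a, b, (hmem _).mpr ha, (hmem _).mpr hb,
      fun x hx => hbet x ((hmem _).mp hx), hg1, hg2⟩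
    obtain ⟨i, hi, h1, h2, h3, h4⟩ := haw
    refine ⟨(s[i], s[i + 1]), (pv_mem_adj s _).mpr ⟨i, hi, rfl, rfl⟩, ?_⟩
    rw [if_pos (by rw [h1, h2])]
    apply List.mem_map.mpr
    refine ⟨p.2, PySem.List.mem_pyRange_one.mpr ⟨h3, h4⟩, ?_⟩
    apply Prod.ext
    · simpa using h1
    · rfl

-- Programs as write applications ---------------------------------------------

theorem pv_range_zip (xs : List Int) :
    (PySem.List.pyRange 0 ((xs.length : Int) - 1)).map
        (fun i => (PySem.List.pyGetD xs i 0, PySem.List.pyGetD xs (i + 1) 0))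
      = pvAdj xs := by
  rw [PySem.List.pyRange_one, List.map_map]
  rw [show (((xs.length : Int) - 1) - 0).toNat = xs.length - 1 by omega]
  unfold pvAdj
  apply List.ext_getElem
  · simp [List.length_zip, List.length_tail]
  · intro n hn1 hn2
    have hn : n < xs.length - 1 := by simpa using hn1
    simp only [List.getElem_map, List.getElem_range, Function.comp]
    have h1 : (0 : Int) + (n : Int) = ((n : Nat) : Int) := by omega
    rw [h1, show ((n : Nat) : Int) + 1 = (((n + 1 : Nat)) : Int) by push_cast; ring]
    rw [PySem.List.pyGetD_natCast, PySem.List.pyGetD_natCast]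
    rw [List.getElem_zip]
    have hna : n < xs.length := by omega
    have hnb : n + 1 < xs.length := by omega
    rw [List.getD_eq_getElem xs 0 hna, List.getD_eq_getElem xs 0 hnb]
    apply Prod.ext
    · simp
    · simp [List.getElem_tail]

theorem pv_range_pairs {γ : Type} (xs : List Int) (f : Int → Int → γ) (acc : List γ) :
    (PySem.List.pyRange 0 ((xs.length : Int) - 1)).foldl
        (fun ps i => ps ++ [f (PySem.List.pyGetD xs i 0) (PySem.List.pyGetD xs (i + 1) 0)]) acc
      = acc ++ (pvAdj xs).map (fun ab => f ab.1 ab.2) := by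
  rw [PySem.List.foldl_append_singleton_eq_map
    (fun i => f (PySem.List.pyGetD xs i 0) (PySem.List.pyGetD xs (i + 1) 0))]
  rw [← pv_range_zip xs, List.map_map]
  rfl

theorem pv_pairs_split (ds : List (Int × Int)) :
    pvGetConsecutivePairs ds
      = (pvGroup ds).items.flatMap (fun rc =>
          (pvAdj (PySem.List.sorted rc.2 (fun x => x))).map (fun ab => ((rc.1, ab.1), (rc.1, ab.2))))
        ++ (pvGroup (ds.map Prod.swap)).items.flatMap (fun cr =>
          (pvAdj (PySem.List.sorted cr.2 (fun x => x))).map (fun ab => ((ab.1, cr.1), (ab.2, cr.1)))) := by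
  unfold pvGetConsecutivePairs
  dsimp only
  rw [show (ds.foldl (fun d p => d.modify p.1 [] fun l => l ++ [p.2]) PySem.Dict.empty)
      = pvGroup ds from rfl]
  have hcol : (ds.foldl (fun d p => d.modify p.2 [] fun l => l ++ [p.1]) PySem.Dict.empty)
      = pvGroup (ds.map Prod.swap) := by
    unfold pvGroup
    rw [List.foldl_map]
    rfl
  rw [hcol]
  have hloop : ∀ (items : List (Int × List Int))
      (mk : Int × List Int → Int → Int → (Int × Int) × (Int × Int))
      (acc : List ((Int × Int) × (Int × Int))),
      items.foldl (fun pairs rc =>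
        (PySem.List.pyRange 0 (((PySem.List.sorted rc.2 (fun x => x)).length : Int) - 1)).foldl
          (fun pairs i => pairs ++ [mk rc (PySem.List.pyGetD (PySem.List.sorted rc.2 (fun x => x)) i 0)
            (PySem.List.pyGetD (PySem.List.sorted rc.2 (fun x => x)) (i + 1) 0)]) pairs) acc
      = acc ++ items.flatMap (fun rc =>
          (pvAdj (PySem.List.sorted rc.2 (fun x => x))).map (fun ab => mk rc ab.1 ab.2)) := by
    intro items mk
    induction items with
    | nil => intro acc; simp
    | cons rc items ih =>
      intro acc
      rw [List.foldl_cons, pv_range_pairs (PySem.List.sorted rc.2 (fun x => x)) (mk rc) acc, ih]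
      simp
  rw [hloop (pvGroup ds).items (fun rc a b => ((rc.1, a), (rc.1, b))) []]
  rw [hloop (pvGroup (ds.map Prod.swap)).items (fun cr a b => ((a, cr.1), (b, cr.1)))]
  simp

/-- A's per-pair writes. -/
def pvW (pr : (Int × Int) × (Int × Int)) : List (Int × Int) :=
  if pr.1.1 = pr.2.1 then (PySem.List.pyRange (pr.1.2 + 2) (pr.2.2 - 1)).map (fun c => (pr.1.1, c))
  else if pr.1.2 = pr.2.2 then (PySem.List.pyRange (pr.1.1 + 2) (pr.2.1 - 1)).map (fun r => (r, pr.1.2))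
  else []

theorem pv_flatH (items : List (Int × List Int)) :
    (items.flatMap (fun rc =>
        (pvAdj (PySem.List.sorted rc.2 (fun x => x))).map (fun ab => ((rc.1, ab.1), (rc.1, ab.2))))).flatMap pvW
      = items.flatMap (fun rc =>
          (pvAdj (PySem.List.sorted rc.2 (fun x => x))).flatMap (fun ab =>
            (PySem.List.pyRange (ab.1 + 2) (ab.2 - 1)).map (fun c => (rc.1, c)))) := by
  rw [List.flatMap_assoc]
  refine congrArg (fun F => List.flatMap F items) (funext fun rc => ?_)
  rw [List.flatMap_map]
  refine congrArg (fun F => List.flatMap F (pvAdj (PySem.List.sorted rc.2 (fun x => x)))) (funext fun ab => ?_)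
  simp [pvW]

theorem pv_flatV (items : List (Int × List Int)) :
    (items.flatMap (fun cr =>
        (pvAdj (PySem.List.sorted cr.2 (fun x => x))).map (fun ab => ((ab.1, cr.1), (ab.2, cr.1))))).flatMap pvW
      = (items.flatMap (fun cr =>
          (pvAdj (PySem.List.sorted cr.2 (fun x => x))).flatMap (fun ab =>
            (PySem.List.pyRange (ab.1 + 2) (ab.2 - 1)).map (fun c => (cr.1, c))))).map Prod.swap := by
  rw [List.flatMap_assoc, List.map_flatMap]
  refine congrArg (fun F => List.flatMap F items) (funext fun cr => ?_)
  rw [List.flatMap_map, List.map_flatMap]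
  refine congrArg (fun F => List.flatMap F (pvAdj (PySem.List.sorted cr.2 (fun x => x)))) (funext fun ab => ?_)
  by_cases h : ab.1 = ab.2
  · have e1 : PySem.List.pyRange (cr.1 + 2) (cr.1 - 1) = [] :=
      PySem.List.pyRange_one_eq_nil (by omega)
    have e2 : PySem.List.pyRange (ab.1 + 2) (ab.2 - 1) = [] :=
      PySem.List.pyRange_one_eq_nil (by omega)
    simp [pvW, h, e1]
    exact PySem.List.pyRange_one_eq_nil (by omega)
  · simp [Function.comp, pvW, h, List.map_map]

theorem pv_A_eq_fill (g : List (List Int)) (ds : List (Int × Int)) (v : Int) :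
    draw_connections_py g ds v = pvFill g (pvAH ds ++ (pvAH (ds.map Prod.swap)).map Prod.swap) v := by
  unfold draw_connections_py
  rw [pv_pairs_split ds]
  rw [pv_foldl_fill v pvW
    (fun result pr =>
      if pr.1.1 = pr.2.1 then
        (PySem.List.pyRange (pr.1.2 + 2) (pr.2.2 - 1)).foldl (fun result c => pvSetCell result pr.1.1 c v) result
      else if pr.1.2 = pr.2.2 then
        (PySem.List.pyRange (pr.1.1 + 2) (pr.2.1 - 1)).foldl (fun result r => pvSetCell result r pr.1.2 v) result
      else result)
    (by
      intro g' a
      unfold pvW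
      by_cases h1 : a.1.1 = a.2.1
      · simp [h1, pvFill, List.foldl_map]
      · by_cases h2 : a.1.2 = a.2.2
        · simp [h1, h2, pvFill, List.foldl_map]
        · simp [h1, h2, pvFill])]
  rw [List.flatMap_append, pv_flatH, pv_flatV]
  rfl

theorem pv_B_eq_fill (g : List (List Int)) (ds : List (Int × Int)) (v : Int) :
    draw_connections_py_alt g ds v = pvFill g (pvBH ds ++ (pvBH (ds.map Prod.swap)).map Prod.swap) v := by
  have hslice : ∀ (l : List (Int × Int)), PySem.List.slice l (some 1) none = l.tail := by
    intro l
    rw [PySem.List.slice_from l (by norm_num : (0:Int) ≤ 1)]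
    simp [List.drop_one]
  unfold draw_connections_py_alt
  dsimp only
  rw [hslice, hslice, pv_sorted2_snd_fst ds]
  set s := PySem.List.sorted2 ds (fun p => p.1) (fun p => p.2) with hs
  set s' := PySem.List.sorted2 (ds.map Prod.swap) (fun p => p.1) (fun p => p.2) with hs'
  have hfirst : (s.zip s.tail).foldl (fun result pq =>
      if pq.1.1 = pq.2.1 then
        (PySem.List.pyRange (pq.1.2 + 2) (pq.2.2 - 1)).foldl (fun result c => pvSetCell result pq.1.1 c v) result
      else result) g = pvFill g (pvBH ds) v := by
    apply pv_foldl_fill v (fun pq : (Int × Int) × (Int × Int) => if pq.1.1 = pq.2.1 then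
      (PySem.List.pyRange (pq.1.2 + 2) (pq.2.2 - 1)).map (fun c => (pq.1.1, c)) else [])
    intro g' a
    by_cases h : a.1.1 = a.2.1
    · simp [h, pvFill, List.foldl_map]
    · simp [h, pvFill]
  have hzipmap : (s'.map Prod.swap).zip (s'.map Prod.swap).tail
      = (s'.zip s'.tail).map (Prod.map Prod.swap Prod.swap) := by
    rw [← List.map_tail, List.zip_map]
  have hsecond : ∀ g' : List (List Int), ((s'.map Prod.swap).zip (s'.map Prod.swap).tail).foldl (fun result pq =>
      if pq.1.2 = pq.2.2 then
        (PySem.List.pyRange (pq.1.1 + 2) (pq.2.1 - 1)).foldl (fun result r => pvSetCell result r pq.1.2 v) result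
      else result) g' = pvFill g' ((pvBH (ds.map Prod.swap)).map Prod.swap) v := by
    intro g'
    rw [hzipmap, List.foldl_map]
    have hflat : (s'.zip s'.tail).flatMap (fun qq =>
        if qq.1.1 = qq.2.1 then
          (PySem.List.pyRange (qq.1.2 + 2) (qq.2.2 - 1)).map (fun rr => (rr, qq.1.1)) else [])
        = (pvBH (ds.map Prod.swap)).map Prod.swap := by
      unfold pvBH pvAdj
      rw [← hs', List.map_flatMap]
      congr 1
      funext qq
      by_cases h : qq.1.1 = qq.2.1
      · simp [h, List.map_map, Function.comp]
      · simp [h]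
    rw [← hflat]
    apply pv_foldl_fill v (fun qq : (Int × Int) × (Int × Int) => if qq.1.1 = qq.2.1 then
      (PySem.List.pyRange (qq.1.2 + 2) (qq.2.2 - 1)).map (fun rr => (rr, qq.1.1)) else [])
    intro g'' a
    by_cases h : a.1.1 = a.2.1
    · simp [h, pvFill, List.foldl_map, Prod.map]
    · simp [h, pvFill, Prod.map]
  rw [hfirst, hsecond, pvFill, pvFill, pvFill, ← List.foldl_append]

-- Pointwise semantics of pvFill ----------------------------------------------

theorem pv_getD_set {α : Type} (l : List α) (k : Nat) (y : α) (i : Nat) (d : α) :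
    (l.set k y).getD i d = if k = i ∧ k < l.length then y else l.getD i d := by
  conv_lhs => rw [List.getD_eq_getElem?_getD]
  rw [List.getElem?_set]
  by_cases hk : k = i
  · subst hk
    by_cases hl : k < l.length
    · rw [if_pos rfl, if_pos hl, if_pos ⟨rfl, hl⟩]
      rfl
    · rw [if_pos rfl, if_neg hl, if_neg (by tauto)]
      simp [List.getD_eq_getElem?_getD, List.getElem?_eq_none (by omega : l.length ≤ k)]
  · rw [if_neg hk, if_neg (by tauto), ← List.getD_eq_getElem?_getD]

theorem pv_pvIdx_lt {n : Nat} {i : Int} (h : PySem.Raise.InRange n i) : pvIdx n i < n := by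
  rw [PySem.Raise.InRange.eq_1] at h
  unfold pvIdx
  split <;> omega

theorem pv_pyIdx_eq {n : Nat} {i : Int} (h : PySem.Raise.InRange n i) :
    PySem.List.pyIdx? n i = some (pvIdx n i) := by
  rw [PySem.Raise.InRange.eq_1] at h
  rw [PySem.List.pyIdx?.eq_1]
  unfold pvIdx
  split
  · rw [if_pos (by omega)]
  · rw [if_pos (by omega)]

theorem pv_pyGetD_inRange {α : Type} (xs : List α) {i : Int} (d : α)
    (h : PySem.Raise.InRange xs.length i) :
    PySem.List.pyGetD xs i d = xs.getD (pvIdx xs.length i) d := by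
  rw [PySem.List.pyGetD.eq_1, PySem.List.pyGet?.eq_1, pv_pyIdx_eq h]
  simp [List.getD_eq_getElem?_getD]

theorem pv_pySetD_inRange {α : Type} (xs : List α) {i : Int} (v : α)
    (h : PySem.Raise.InRange xs.length i) :
    PySem.List.pySetD xs i v = xs.set (pvIdx xs.length i) v := by
  rw [PySem.List.pySetD.eq_1, PySem.List.pySet?.eq_1, pv_pyIdx_eq h]
  rfl

theorem pv_rowlen_getD (g : List (List Int)) (i : Nat) :
    (g.map List.length).getD i 0 = (g.getD i []).length := by
  by_cases h : i < g.length
  · rw [List.getD_eq_getElem _ 0 (by simpa using h), List.getD_eq_getElem _ [] h]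
    exact List.getElem_map _
  · rw [List.getD_eq_getElem?_getD, List.getD_eq_getElem?_getD,
      List.getElem?_eq_none (by simpa using h), List.getElem?_eq_none (by omega)]
    rfl

theorem pv_setCell_eq (g : List (List Int)) (r c v : Int) (h : pvOkW g (r, c)) :
    pvSetCell g r c v
      = g.set (pvIdx g.length r)
          ((g.getD (pvIdx g.length r) []).set (pvIdx (g.getD (pvIdx g.length r) []).length c) v) := by
  obtain ⟨h1, h2⟩ := h
  have hk : pvIdx g.length r < g.length := pv_pvIdx_lt h1
  have hrowmem : g.getD (pvIdx g.length r) [] ∈ g := by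
    rw [List.getD_eq_getElem _ [] hk]
    exact List.getElem_mem _
  have hc : PySem.Raise.InRange (g.getD (pvIdx g.length r) []).length c := h2 _ hrowmem
  unfold pvSetCell
  rw [pv_pyGetD_inRange g [] h1, pv_pySetD_inRange _ v hc, pv_pySetD_inRange g _ h1]

theorem pv_setCell_rowlens (g : List (List Int)) (r c v : Int) (h : pvOkW g (r, c)) :
    (pvSetCell g r c v).map List.length = g.map List.length := by
  have hk : pvIdx g.length r < g.length := pv_pvIdx_lt h.1
  rw [pv_setCell_eq g r c v h, List.map_set]
  apply List.ext_getElem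
  · simp
  · intro n hn1 hn2
    rw [List.getElem_set]
    split
    · next heq =>
      subst heq
      simp only [List.length_set, List.getElem_map]
      rw [List.getD_eq_getElem g [] hk]
    · rfl

theorem pv_setCell_getD (g : List (List Int)) (r c v : Int) (h : pvOkW g (r, c)) (i j : Nat) :
    ((pvSetCell g r c v).getD i []).getD j 0
      = if i = pvIdx g.length r ∧ j = pvIdx (g.getD i []).length c then v
        else (g.getD i []).getD j 0 := by
  have hk : pvIdx g.length r < g.length := pv_pvIdx_lt h.1
  rw [pv_setCell_eq g r c v h]
  rw [pv_getD_set]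
  by_cases hi : pvIdx g.length r = i
  · subst hi
    rw [if_pos ⟨rfl, hk⟩, pv_getD_set]
    have hrowmem : g.getD (pvIdx g.length r) [] ∈ g := by
      rw [List.getD_eq_getElem _ [] hk]
      exact List.getElem_mem _
    have hm : pvIdx (g.getD (pvIdx g.length r) []).length c < (g.getD (pvIdx g.length r) []).length :=
      pv_pvIdx_lt (h.2 _ hrowmem)
    by_cases hj : pvIdx (g.getD (pvIdx g.length r) []).length c = j
    · subst hj
      rw [if_pos ⟨rfl, hm⟩, if_pos ⟨rfl, rfl⟩]
    · rw [if_neg (by tauto), if_neg (by tauto)]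
  · rw [if_neg (by tauto), if_neg (by tauto)]

theorem pv_okW_congr (g g' : List (List Int))
    (hrl : g'.map List.length = g.map List.length) (p : Int × Int) (h : pvOkW g p) : pvOkW g' p := by
  obtain ⟨h1, h2⟩ := h
  have hlen : g'.length = g.length := by
    have := congrArg List.length hrl
    simpa using this
  refine ⟨by rw [hlen]; exact h1, ?_⟩
  intro row hrow
  have hmem : row.length ∈ g'.map List.length := List.mem_map_of_mem hrow
  rw [hrl] at hmem
  obtain ⟨row0, hrow0, heq⟩ := List.mem_map.mp hmem
  rw [show PySem.Raise.InRange row.length p.2 = PySem.Raise.InRange row0.length p.2 by rw [heq]]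
  exact h2 row0 hrow0

theorem pv_fill_rowlens (v : Int) :
    ∀ (ws : List (Int × Int)) (g : List (List Int)), (∀ p ∈ ws, pvOkW g p) →
      (pvFill g ws v).map List.length = g.map List.length := by
  intro ws
  induction ws with
  | nil => intro g _; rfl
  | cons p ws ih =>
    intro g h
    have hok : pvOkW g (p.1, p.2) := by
      have := h p (by simp)
      exact this
    have hrl := pv_setCell_rowlens g p.1 p.2 v hok
    have hok' : ∀ q ∈ ws, pvOkW (pvSetCell g p.1 p.2 v) q :=
      fun q hq => pv_okW_congr _ _ hrl q (h q (by simp [hq]))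
    show (pvFill (pvSetCell g p.1 p.2 v) ws v).map List.length = _
    rw [ih _ hok', hrl]

theorem pv_fill_getD (v : Int) :
    ∀ (ws : List (Int × Int)) (g : List (List Int)), (∀ p ∈ ws, pvOkW g p) →
      ∀ i j : Nat,
        ((pvFill g ws v).getD i []).getD j 0
          = if (∃ p ∈ ws, i = pvIdx g.length p.1 ∧ j = pvIdx (g.getD i []).length p.2) then v
            else (g.getD i []).getD j 0 := by
  intro ws
  induction ws with
  | nil => intro g _ i j; simp [pvFill]
  | cons p ws ih =>
    intro g h i j
    have hok : pvOkW g (p.1, p.2) := h p (by simp)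
    have hrl := pv_setCell_rowlens g p.1 p.2 v hok
    have hok' : ∀ q ∈ ws, pvOkW (pvSetCell g p.1 p.2 v) q :=
      fun q hq => pv_okW_congr _ _ hrl q (h q (by simp [hq]))
    have hstep := pv_setCell_getD g p.1 p.2 v hok i j
    have hlen : (pvSetCell g p.1 p.2 v).length = g.length := by
      have := congrArg List.length hrl
      simpa using this
    have hrowlen : ((pvSetCell g p.1 p.2 v).getD i []).length = (g.getD i []).length := by
      rw [← pv_rowlen_getD, ← pv_rowlen_getD, hrl]
    show ((pvFill (pvSetCell g p.1 p.2 v) ws v).getD i []).getD j 0 = _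
    rw [ih _ hok' i j, hstep]
    simp only [hlen, hrowlen]
    by_cases hmem : ∃ q ∈ ws, i = pvIdx g.length q.1 ∧ j = pvIdx (g.getD i []).length q.2
    · rw [if_pos hmem, if_pos (by
        obtain ⟨q, hq, hqe⟩ := hmem
        exact ⟨q, List.mem_cons_of_mem p hq, hqe⟩)]
    · rw [if_neg hmem]
      by_cases hp : i = pvIdx g.length p.1 ∧ j = pvIdx (g.getD i []).length p.2
      · rw [if_pos hp, if_pos ⟨p, List.mem_cons_self, hp⟩]
      · rw [if_neg hp, if_neg (by
          rintro ⟨q, hq, hqe⟩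
          rcases List.mem_cons.mp hq with rfl | hq'
          · exact hp hqe
          · exact hmem ⟨q, hq', hqe⟩)]

-- Assembly --------------------------------------------------------------------

theorem pv_mem_map_swap (ds : List (Int × Int)) (p : Int × Int) :
    p ∈ ds.map Prod.swap ↔ p.swap ∈ ds := by
  rw [List.mem_map]
  constructor
  · rintro ⟨q, hq, rfl⟩
    simpa using hq
  · intro hq
    exact ⟨p.swap, hq, by simp⟩

theorem pv_gap_okW (g : List (List Int)) (ds : List (Int × Int)) (r c : Int)
    (hpre : Pre_draw_connections_py g ds 0) (h : pvGap ds r c) : pvOkW g (r, c) := by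
  obtain ⟨a, b, ha, hb, hbet, hc1, hc2⟩ := h
  have hcond := (hpre _ ha _ hb).1 ⟨rfl, by simp; omega, by
    intro d3 hd3 hfst
    have hf : d3.1 = r := by simpa using hfst
    have hx := hbet d3.2 (by rwa [show (r, d3.2) = d3 by rw [← hf]])
    simpa using hx⟩
  obtain ⟨hrow, hcols⟩ := hcond
  refine ⟨by simpa using hrow, ?_⟩
  intro row hrowm
  obtain ⟨hco1, hco2⟩ := hcols row hrowm
  rw [PySem.Raise.InRange.eq_1] at hco1 hco2 ⊢
  simp at hco1 hco2 ⊢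
  omega

theorem pv_gap_okW_v (g : List (List Int)) (ds : List (Int × Int)) (r c : Int)
    (hpre : Pre_draw_connections_py g ds 0) (h : pvGap (ds.map Prod.swap) r c) : pvOkW g (c, r) := by
  obtain ⟨a, b, ha, hb, hbet, hc1, hc2⟩ := h
  rw [pv_mem_map_swap] at ha hb
  have hcond := (hpre _ ha _ hb).2 ⟨rfl, by simp; omega, by
    intro d3 hd3 hsnd
    have hs2 : d3.2 = r := by simpa using hsnd
    have hx := hbet d3.1 (by
      rw [pv_mem_map_swap]
      show (d3.1, r) ∈ ds
      rwa [show (d3.1, r) = d3 by rw [← hs2]])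
    simpa using hx⟩
  obtain ⟨hr1, hr2, hcols⟩ := hcond
  constructor
  · rw [PySem.Raise.InRange.eq_1] at hr1 hr2 ⊢
    simp at hr1 hr2 ⊢
    omega
  · intro row hrowm
    have := hcols row hrowm
    simpa using this

theorem pv_main (g : List (List Int)) (ds : List (Int × Int)) (v : Int)
    (hpre : Pre_draw_connections_py g ds 0) :
    draw_connections_py g ds v = draw_connections_py_alt g ds v := by
  rw [pv_A_eq_fill, pv_B_eq_fill]
  set wsA := pvAH ds ++ (pvAH (ds.map Prod.swap)).map Prod.swap with hwsA
  set wsB := pvBH ds ++ (pvBH (ds.map Prod.swap)).map Prod.swap with hwsB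
  have hmemA : ∀ p : Int × Int, p ∈ wsA ↔ (pvGap ds p.1 p.2 ∨ pvGap (ds.map Prod.swap) p.2 p.1) := by
    intro p
    rw [hwsA, List.mem_append, pv_mem_AH, pv_mem_map_swap, pv_mem_AH]
    simp
  have hmemB : ∀ p : Int × Int, p ∈ wsB ↔ (pvGap ds p.1 p.2 ∨ pvGap (ds.map Prod.swap) p.2 p.1) := by
    intro p
    rw [hwsB, List.mem_append, pv_mem_BH, pv_mem_map_swap, pv_mem_BH]
    simp
  have hokA : ∀ p ∈ wsA, pvOkW g p := by
    intro p hp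
    rcases (hmemA p).mp hp with hg | hg
    · simpa using pv_gap_okW g ds p.1 p.2 hpre hg
    · simpa using pv_gap_okW_v g ds p.2 p.1 hpre hg
  have hokB : ∀ p ∈ wsB, pvOkW g p := by
    intro p hp
    rcases (hmemB p).mp hp with hg | hg
    · simpa using pv_gap_okW g ds p.1 p.2 hpre hg
    · simpa using pv_gap_okW_v g ds p.2 p.1 hpre hg
  have hrlA := pv_fill_rowlens v wsA g hokA
  have hrlB := pv_fill_rowlens v wsB g hokB
  have hlenA : (pvFill g wsA v).length = g.length := by
    have := congrArg List.length hrlA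
    simpa using this
  have hlenB : (pvFill g wsB v).length = g.length := by
    have := congrArg List.length hrlB
    simpa using this
  apply List.ext_getElem (by rw [hlenA, hlenB])
  intro n hn1 hn2
  have hn : n < g.length := by rw [hlenA] at hn1; exact hn1
  have hrowA : (pvFill g wsA v)[n].length = g[n].length := by
    calc (pvFill g wsA v)[n].length = ((pvFill g wsA v).map List.length)[n]'(by simpa using hn1) := (List.getElem_map _).symm
      _ = (g.map List.length)[n]'(by simpa using hn) := by simp only [hrlA]
      _ = g[n].length := List.getElem_map _
  have hrowB : (pvFill g wsB v)[n].length = g[n].length := by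
    calc (pvFill g wsB v)[n].length = ((pvFill g wsB v).map List.length)[n]'(by simpa using hn2) := (List.getElem_map _).symm
      _ = (g.map List.length)[n]'(by simpa using hn) := by simp only [hrlB]
      _ = g[n].length := List.getElem_map _
  apply List.ext_getElem (by rw [hrowA, hrowB])
  intro m hm1 hm2
  have e1 : ((pvFill g wsA v).getD n []).getD m 0 = (pvFill g wsA v)[n][m] := by
    rw [List.getD_eq_getElem _ [] hn1, List.getD_eq_getElem _ 0 hm1]
  have e2 : ((pvFill g wsB v).getD n []).getD m 0 = (pvFill g wsB v)[n][m] := by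
    rw [List.getD_eq_getElem _ [] hn2, List.getD_eq_getElem _ 0 hm2]
  rw [← e1, ← e2, pv_fill_getD v wsA g hokA n m, pv_fill_getD v wsB g hokB n m]
  refine if_congr ?_ rfl rfl
  constructor
  · rintro ⟨q, hq, hqe⟩
    exact ⟨q, (hmemB q).mpr ((hmemA q).mp hq), hqe⟩
  · rintro ⟨q, hq, hqe⟩
    exact ⟨q, (hmemA q).mpr ((hmemB q).mp hq), hqe⟩

-- ===== VERDICT (by name: the statement is the Claim_ definition above) =====
theorem draw_connections_py_spec : Claim_equal_draw_connections_py := by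
  intro grid diamonds cc _hdom hpre
  unfold Spec_draw_connections_py
  exact pv_main grid diamonds cc (by intro p hp; exact hpre p hp)
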